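-- pv_equiv track=rewrite | github.com/P2P-Develop/ServerTemplate.py | src/utils/sqlmodifier.py | _gen_qas
-- ===== SOURCE A (Python) =====
-- def _gen_qas(data):
--     fn = ""
--     for sn in range(0, len(data)):
--         if fn != "":
--             fn += " AND "
--         else:
--             fn += "?=?"
--     return fn
-- ===== SOURCE B (Python) =====
-- def _gen_qas(data):
--     n = len(data)
--     return "" if n == 0 else "?=?" + " AND " * (n - 1)
-- ===== Notes on version B (the rewrite author's own statement) =====
-- stated objective: simpler
-- what changed: Replaces the per-element accumulation loop with a closed-form string formula: empty string for empty input, otherwise "?=?" plus (n-1) copies of " AND ".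
import Mathlib
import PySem

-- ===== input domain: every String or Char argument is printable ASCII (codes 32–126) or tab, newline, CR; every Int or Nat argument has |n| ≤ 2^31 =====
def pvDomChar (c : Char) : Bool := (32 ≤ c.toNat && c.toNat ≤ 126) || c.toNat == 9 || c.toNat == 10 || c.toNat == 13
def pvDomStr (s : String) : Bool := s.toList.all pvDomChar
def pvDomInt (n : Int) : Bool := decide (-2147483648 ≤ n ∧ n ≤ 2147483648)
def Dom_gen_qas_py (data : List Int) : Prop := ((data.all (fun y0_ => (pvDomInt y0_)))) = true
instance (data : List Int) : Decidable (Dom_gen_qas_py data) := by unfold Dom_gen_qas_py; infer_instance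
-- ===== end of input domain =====

-- B replaces A's accumulation loop by a closed-form string formula (simpler).

-- ===== PORT A =====
-- for sn in range(0, len(data)): fn += " AND " if fn != "" else "?=?"
def gen_qas_py (data : List Int) : String :=
  (PySem.List.pyRange 0 (data.length : Int) 1).foldl
    (fun fn _ => if fn ≠ "" then fn ++ " AND " else fn ++ "?=?") ""

-- ===== PORT B =====
-- "" if n == 0 else "?=?" + " AND " * (n - 1)
def gen_qas_py_alt (data : List Int) : String :=
  if data.length = 0 then "" else "?=?" ++ String.join (List.replicate (data.length - 1) " AND ")

-- ===== PRECONDITION & SPEC =====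
def Spec_gen_qas_py (data : List Int) (out : String) : Prop := out = gen_qas_py_alt data
instance (data : List Int) (out : String) : Decidable (Spec_gen_qas_py data out) := by unfold Spec_gen_qas_py; infer_instance

-- ===== CLAIM (what is proved, stated in full; the proofs are below) =====
def Claim_equal_gen_qas_py : Prop := ∀ (data : List Int), Dom_gen_qas_py data → Spec_gen_qas_py data (gen_qas_py data)

-- ===== LEMMAS AND PROOFS =====

theorem pv_append_AND_ne (s : String) : s ++ " AND " ≠ "" := by
  intro h
  have := congrArg String.length h
  simp [String.length_append] at this

theorem pv_foldl_app (l : List String) : ∀ (t : String),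
    t ++ l.foldl (fun r s => r ++ s) "" = l.foldl (fun r s => r ++ s) t := by
  induction l with
  | nil => intro t; simp
  | cons a l ih =>
      intro t
      simp only [List.foldl_cons]
      rw [show ("" ++ a : String) = a from by simp, ← ih a, ← ih (t ++ a), String.append_assoc]

-- invariant: once the accumulator is nonempty, each step appends " AND "
theorem pv_loop_inv (l : List Int) : ∀ (s : String), s ≠ "" →
    l.foldl (fun fn _ => if fn ≠ "" then fn ++ " AND " else fn ++ "?=?") s
      = s ++ String.join (List.replicate l.length " AND ") := by
  induction l with
  | nil => intro s _; simp [String.join]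
  | cons x xs ih =>
      intro s hs
      simp only [List.foldl_cons, if_pos hs, List.length_cons]
      rw [ih (s ++ " AND ") (pv_append_AND_ne s)]
      simp only [List.replicate_succ, String.join, List.foldl_cons,
        show ("" ++ " AND " : String) = " AND " from by simp]
      rw [← pv_foldl_app (List.replicate xs.length " AND ") " AND ", String.append_assoc]

-- ===== VERDICT (by name: the statement is the Claim_ definition above) =====
theorem gen_qas_py_spec : Claim_equal_gen_qas_py := by
  intro data _
  unfold Spec_gen_qas_py gen_qas_py gen_qas_py_alt
  cases data with
  | nil => simp [PySem.List.pyRange_one_eq_nil]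
  | cons x xs =>
      rw [PySem.List.pyRange_one_cons (by simp only [List.length_cons]; positivity)]
      simp only [List.foldl_cons]
      have h1 : (if ("" : String) ≠ "" then "" ++ " AND " else "" ++ "?=?") = "?=?" := by decide
      rw [h1, pv_loop_inv _ "?=?" (by decide)]
      have hlen : (PySem.List.pyRange (0 + 1) ((x :: xs).length : Int) 1).length = xs.length := by
        rw [PySem.List.length_pyRange_one]; simp only [List.length_cons]; omega
      rw [hlen]
      simp
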